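-- pv_equiv track=rewrite | github.com/mengfei25/torch-xpu-ops | .github/scripts/summarize-test.py | e2e_merge_accuracy
-- ===== SOURCE A (Python) =====
-- def e2e_merge_accuracy(records):
--     pass_recs = [r for r in records if 'pass' in str(r['accuracy'])]
--     if pass_recs:
--         return pass_recs[0]
--     fail_recs = [r for r in records if 'fail' in str(r['accuracy'])]
--     if fail_recs:
--         return fail_recs[0]
--     return records[0]
-- ===== SOURCE B (Python) =====
-- def e2e_merge_accuracy(records):
--     ranks = [0 if 'pass' in str(r['accuracy']) else 1 if 'fail' in str(r['accuracy']) else 2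
--              for r in records]
--     return records[ranks.index(min(ranks))]
-- ===== Notes on version B (the rewrite author's own statement) =====
-- stated objective: alternative
-- what changed: B scores each record once with a numeric rank (0 if 'pass' in accuracy, 1 if 'fail', 2 otherwise) and returns the record at the argmin index (records[ranks.index(min(ranks))]), instead of A's staged pass/fail filter passes with fallback.
import Mathlib
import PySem

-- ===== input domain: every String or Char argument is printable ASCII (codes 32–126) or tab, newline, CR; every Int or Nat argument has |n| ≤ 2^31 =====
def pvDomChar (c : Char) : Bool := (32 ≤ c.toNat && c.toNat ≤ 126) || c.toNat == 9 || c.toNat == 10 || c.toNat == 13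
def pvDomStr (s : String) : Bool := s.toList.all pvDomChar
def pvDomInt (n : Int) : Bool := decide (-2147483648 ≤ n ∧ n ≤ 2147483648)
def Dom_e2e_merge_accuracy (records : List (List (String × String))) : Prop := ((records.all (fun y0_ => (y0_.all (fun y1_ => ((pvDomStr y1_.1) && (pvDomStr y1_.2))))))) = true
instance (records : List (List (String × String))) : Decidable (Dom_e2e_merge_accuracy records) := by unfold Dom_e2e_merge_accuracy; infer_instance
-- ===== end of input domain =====

-- B ranks each record (0 pass, 1 fail, 2 other) and returns records[ranks.index(min(ranks))] — an argmin selection instead of A's staged filters (alternative decomposition, same cost).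


-- str(r['accuracy']) for a str-valued dict: the value itself; getD "" is only reached outside Pre_ (KeyError in Python)
def pvAcc (r : List (String × String)) : String := ((PySem.Dict.ofList r).get? "accuracy").getD ""
-- 'pass' in str(r['accuracy'])
def pvPass (r : List (String × String)) : Bool := PySem.Str.isIn "pass" (pvAcc r)
-- 'fail' in str(r['accuracy'])
def pvFail (r : List (String × String)) : Bool := PySem.Str.isIn "fail" (pvAcc r)

-- ===== PORT A =====
def e2e_merge_accuracy (records : List (List (String × String))) : List (String × String) :=
  match records.filter pvPass with      -- pass_recs = [r for r in records if 'pass' in str(r['accuracy'])]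
  | p :: _ => p                         -- return pass_recs[0]
  | [] =>
    match records.filter pvFail with    -- fail_recs = [r for r in records if 'fail' in str(r['accuracy'])]
    | f :: _ => f                       -- return fail_recs[0]
    | [] => (PySem.List.pyGet? records 0).getD []   -- records[0]; none (IndexError) excluded by Pre_

-- ===== PORT B =====
-- 0 if 'pass' in str(r['accuracy']) else 1 if 'fail' in str(r['accuracy']) else 2
def pvRank (r : List (String × String)) : Nat :=
  if pvPass r then 0 else if pvFail r then 1 else 2

def e2e_merge_accuracy_alt (records : List (List (String × String))) : List (String × String) :=
  let ranks := records.map pvRank                 -- ranks = [ ... for r in records]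
  match ranks with
  | [] => []                                      -- min([]) raises ValueError; excluded by Pre_
  | h :: t =>
    let best := t.foldl min h                     -- min(ranks)
    match PySem.List.index? ranks best with       -- ranks.index(min(ranks))
    | some i => (PySem.List.pyGet? records (i : Int)).getD []   -- records[...]
    | none => []                                  -- unreachable: min(ranks) ∈ ranks

-- ===== PRECONDITION & SPEC =====
-- Pre_ excludes exactly where Python A raises: the empty list (IndexError) and records lacking an 'accuracy' key (KeyError).
def Pre_e2e_merge_accuracy (records : List (List (String × String))) : Prop :=
  records ≠ [] ∧ ∀ r ∈ records, (PySem.Dict.ofList r).contains "accuracy" = true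
instance (records : List (List (String × String))) : Decidable (Pre_e2e_merge_accuracy records) := by
  unfold Pre_e2e_merge_accuracy; infer_instance
def pvWitness_e2e_merge_accuracy : (List (List (String × String))) := [[("accuracy", "pass")]]

def Spec_e2e_merge_accuracy (records : List (List (String × String))) (out : List (String × String)) : Prop := out = e2e_merge_accuracy_alt records
instance (records : List (List (String × String))) (out : List (String × String)) : Decidable (Spec_e2e_merge_accuracy records out) := by unfold Spec_e2e_merge_accuracy; infer_instance

-- ===== CLAIM (what is proved, stated in full; the proofs are below) =====
def Claim_equal_e2e_merge_accuracy : Prop := ∀ (records : List (List (String × String))), Dom_e2e_merge_accuracy records → Pre_e2e_merge_accuracy records → Spec_e2e_merge_accuracy records (e2e_merge_accuracy records)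

-- ===== LEMMAS AND PROOFS =====

-- the folded minimum is an element of the list
lemma pvFoldlMin_mem (t : List Nat) : ∀ h : Nat, t.foldl min h ∈ h :: t := by
  induction t with
  | nil => intro h; simp
  | cons a t ih =>
    intro h
    rw [List.foldl_cons]
    rcases List.mem_cons.mp (ih (min h a)) with hm | hm
    · rcases min_choice h a with he | he
      · rw [hm, he]; simp
      · rw [hm, he]; simp
    · exact List.mem_cons_of_mem _ (List.mem_cons_of_mem _ hm)

-- the folded minimum is a lower bound
lemma pvFoldlMin_le (t : List Nat) : ∀ (h x : Nat), x ∈ h :: t → t.foldl min h ≤ x := by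
  induction t with
  | nil => intro h x hx; simp_all
  | cons a t ih =>
    intro h x hx
    rw [List.foldl_cons]
    have hlow : t.foldl min (min h a) ≤ min h a :=
      ih (min h a) (min h a) (by simp)
    rcases List.mem_cons.mp hx with he | hx'
    · subst he; exact le_trans hlow (min_le_left _ _)
    · rcases List.mem_cons.mp hx' with he | hx''
      · subst he; exact le_trans hlow (min_le_right _ _)
      · exact ih (min h a) x (List.mem_cons_of_mem _ hx'')

-- head of filter is find?
lemma pvHead_filter {α : Type} (p : α → Bool) (l : List α) :
    (l.filter p).head? = l.find? p := by
  induction l with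
  | nil => rfl
  | cons a t ih =>
    by_cases hp : p a = true <;> simp [List.find?, hp, ih]

-- find? only looks at the predicate's values on members
lemma pvFind_congr {α : Type} (p q : α → Bool) (l : List α)
    (h : ∀ x ∈ l, p x = q x) : l.find? p = l.find? q := by
  induction l with
  | nil => rfl
  | cons a t ih =>
    have ha := h a (by simp)
    by_cases hp : q a = true
    · simp [List.find?, ha, hp]
    · have hq : q a = false := by simpa using hp
      simp [List.find?, ha, hq]
      exact ih (fun x hx => h x (by simp [hx]))

-- records[(l.map f).index(m)] is the first element of l whose f-value is m
lemma pvArgGet {α : Type} (f : α → Nat) :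
    ∀ (l : List α) (m : Nat), m ∈ l.map f →
      ∃ (i : Nat) (r : α), PySem.List.index? (l.map f) m = some i ∧
        PySem.List.pyGet? l (i : Int) = some r ∧ l.find? (fun x => f x == m) = some r := by
  intro l
  induction l with
  | nil => intro m hm; simp at hm
  | cons a t ih =>
    intro m hm
    by_cases hfa : f a = m
    · refine ⟨0, a, ?_, ?_, ?_⟩
      · rw [show (a :: t).map f = f a :: t.map f from rfl, hfa]
        exact PySem.List.index?_cons_self _ _
      · simp
      · simp [List.find?, hfa]
    · have hm' : m ∈ t.map f := by
        rcases (by simpa using hm) with h | h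
        · exact absurd h.symm hfa
        · simpa using h
      rcases ih m hm' with ⟨i, r, hi, hg, hf⟩
      refine ⟨i + 1, r, ?_, ?_, ?_⟩
      · rw [show (a :: t).map f = f a :: t.map f from rfl,
            PySem.List.index?_cons_of_ne _ hfa, hi]
        rfl
      · have hc : ((i + 1 : Nat) : Int) = (i : Int) + 1 := by push_cast; ring
        rw [hc, PySem.List.pyGet?_cons_succ]; exact hg
      · have hb : (f a == m) = false := by simpa using hfa
        simp [List.find?, hb, hf]

-- ===== VERDICT (by name: the statement is the Claim_ definition above) =====
theorem e2e_merge_accuracy_spec : Claim_equal_e2e_merge_accuracy := by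
  intro records _hdom hpre
  unfold Spec_e2e_merge_accuracy
  obtain ⟨hne, -⟩ := hpre
  obtain ⟨r0, rest, rfl⟩ : ∃ r0 rest, records = r0 :: rest := by
    cases records with
    | nil => exact absurd rfl hne
    | cons a t => exact ⟨a, t, rfl⟩
  set l := r0 :: rest with hl
  set best := (rest.map pvRank).foldl min (pvRank r0) with hbest
  have hmem : best ∈ l.map pvRank := by
    simpa [hl] using pvFoldlMin_mem (rest.map pvRank) (pvRank r0)
  have hle : ∀ x ∈ l, best ≤ pvRank x := by
    intro x hx
    exact pvFoldlMin_le (rest.map pvRank) (pvRank r0) (pvRank x)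
      (by simpa [hl] using List.mem_map_of_mem hx)
  -- B reduces to the first record of minimal rank
  have hB : e2e_merge_accuracy_alt l = (l.find? (fun x => pvRank x == best)).getD [] := by
    rcases pvArgGet pvRank l best hmem with ⟨i, r, hi, hg, hf⟩
    unfold e2e_merge_accuracy_alt
    rw [show l.map pvRank = pvRank r0 :: rest.map pvRank from rfl]
    simp only []
    rw [show (pvRank r0 :: rest.map pvRank) = l.map pvRank from rfl, ← hbest, hi]
    simp [hg, hf]
  rw [hB]
  unfold e2e_merge_accuracy
  by_cases hp : ∃ x ∈ l, pvPass x = true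
  · -- min rank is 0; A returns head of pass filter
    rcases hp with ⟨x, hx, hpx⟩
    have hb0 : best = 0 :=
      Nat.le_zero.mp (by simpa [pvRank, hpx] using hle x hx)
    have hfind : l.find? (fun y => pvRank y == 0) = l.find? pvPass := by
      apply pvFind_congr
      intro y _
      by_cases hy : pvPass y = true
      · simp [pvRank, hy]
      · by_cases hfy : pvFail y = true <;> simp [pvRank, hy, hfy]
    have hhead : (l.filter pvPass).head? = l.find? pvPass := pvHead_filter pvPass l
    cases hfp : l.filter pvPass with
    | nil =>
      exfalso
      have hcontra : pvPass x = false := by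
        have := List.filter_eq_nil_iff.mp hfp
        simpa using this x hx
      simp [hpx] at hcontra
    | cons p t =>
      rw [hfp] at hhead
      simp only [List.head?_cons] at hhead
      simp [hb0, hfind, ← hhead]
  · have hnop : ∀ y ∈ l, pvPass y = false := by
      intro y hy
      by_contra hc
      exact hp ⟨y, hy, by simpa using hc⟩
    have hb0 : best ≠ 0 := by
      intro h0
      rcases List.mem_map.mp hmem with ⟨y, hy, hry⟩
      rw [h0] at hry
      by_cases hfy : pvFail y = true <;> simp [pvRank, hnop y hy, hfy] at hry
    have hfp : l.filter pvPass = [] := List.filter_eq_nil_iff.mpr (by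
      intro y hy; simp [hnop y hy])
    rw [hfp]
    by_cases hf : ∃ x ∈ l, pvFail x = true
    · rcases hf with ⟨x, hx, hfx⟩
      have hb1 : best = 1 := by
        have h1 : best ≤ 1 := by
          simpa [pvRank, hnop x hx, hfx] using hle x hx
        omega
      have hfind : l.find? (fun y => pvRank y == 1) = l.find? pvFail := by
        apply pvFind_congr
        intro y hy
        by_cases hfy : pvFail y = true <;> simp [pvRank, hnop y hy, hfy]
      have hhead : (l.filter pvFail).head? = l.find? pvFail := pvHead_filter pvFail l
      cases hff : l.filter pvFail with
      | nil =>
        exfalso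
        have hcontra : pvFail x = false := by
          have := List.filter_eq_nil_iff.mp hff
          simpa using this x hx
        simp [hfx] at hcontra
      | cons f t =>
        rw [hff] at hhead
        simp only [List.head?_cons] at hhead
        simp [hb1, hfind, ← hhead]
    · have hnof : ∀ y ∈ l, pvFail y = false := by
        intro y hy
        by_contra hc
        exact hf ⟨y, hy, by simpa using hc⟩
      have hb2 : best = 2 := by
        rcases List.mem_map.mp hmem with ⟨y, hy, hry⟩
        rw [← hry]
        simp [pvRank, hnop y hy, hnof y hy]
      have hff : l.filter pvFail = [] := List.filter_eq_nil_iff.mpr (by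
        intro y hy; simp [hnof y hy])
      rw [hff]
      have hfind : l.find? (fun y => pvRank y == 2) = some r0 := by
        rw [hl]
        simp [List.find?, pvRank, hnop r0 (by simp [hl]), hnof r0 (by simp [hl])]
      rw [hb2, hfind]
      rw [hl]
      simp
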